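-- pv_equiv track=rewrite | github.com/JohnForbes/coruscant | f/string/filepath/to_import_paths.py | f
-- ===== SOURCE A (Python) =====
-- def f(x):
--   x = x[2:-3]
--   _ = x.split('/')
--   q, prefix, latch = set([]), '', 0
--   while len(_):
--     q.add(prefix+'.'.join(_))
--     _ = _[1:]
--     if not latch: latch = 1; prefix = '.'
--   return q
-- ===== SOURCE B (Python) =====
-- def f(x):
--   parts = x[2:-3].split('/')
--   acc = parts[-1]
--   res = []
--   for i in range(len(parts) - 2, -1, -1):
--     res.append('.' + acc)
--     acc = parts[i] + '.' + acc
--   res.reverse()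
--   return set([acc] + res)
-- ===== Notes on version B (the rewrite author's own statement) =====
-- stated objective: alternative
-- what changed: Replaces A's forward while-loop that re-joins the whole remaining part list on every iteration (plus the prefix latch and repeated list slicing) by a single right-to-left pass that grows one running suffix string and collects the dotted suffixes in reverse.
import Mathlib
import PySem

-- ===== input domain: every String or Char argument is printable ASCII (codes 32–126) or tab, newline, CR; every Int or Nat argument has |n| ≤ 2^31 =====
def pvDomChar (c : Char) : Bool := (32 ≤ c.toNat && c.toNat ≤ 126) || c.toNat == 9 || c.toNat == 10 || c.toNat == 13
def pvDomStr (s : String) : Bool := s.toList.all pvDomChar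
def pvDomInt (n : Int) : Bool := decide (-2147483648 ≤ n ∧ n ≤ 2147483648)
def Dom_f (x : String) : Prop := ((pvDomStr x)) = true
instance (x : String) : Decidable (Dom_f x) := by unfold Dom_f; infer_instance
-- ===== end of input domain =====

-- B replaces A's forward loop (full '.'.join on every iteration + prefix latch + list slicing)
-- by one right-to-left pass growing a single running suffix; alternative decomposition, same result.

-- ===== PORT A =====
-- the while-loop: q.add(prefix + '.'.join(_)); _ = _[1:]; latch sets prefix to '.' once
def fLoop (l : List String) (q : PySem.Set String) (pre : String) (latch : Int) : List String :=
  match l with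
  | [] => q
  | _ :: t =>
    let q' := PySem.Set.add q (pre ++ PySem.Str.join "." l)
    if latch == 0 then fLoop t q' "." 1 else fLoop t q' pre latch

def f (x : String) : List String :=
  let x' := PySem.Str.slice x (some 2) (some (-3))
  let parts := (PySem.Str.split? x' "/").getD []  -- sep "/" is nonempty, so split? is some (no ValueError)
  fLoop parts PySem.Set.empty "" 0

-- ===== PORT B =====
-- right-to-left pass of Source B: returns (acc = '.'.join of the whole sublist,
-- res = the dotted suffixes '.'+acc of the proper sublists, left-to-right)
def sfx (p : String) (t : List String) : String × List String :=
  match t with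
  | [] => (p, [])
  | q :: t' =>
    let (acc, res) := sfx q t'
    (p ++ "." ++ acc, ("." ++ acc) :: res)

def f_alt (x : String) : List String :=
  let x' := PySem.Str.slice x (some 2) (some (-3))
  let parts := (PySem.Str.split? x' "/").getD []  -- sep "/" is nonempty, so split? is some (no ValueError)
  match parts with
  | [] => []
  | p :: t =>
    let (acc, res) := sfx p t
    PySem.Set.ofList (acc :: res)

-- ===== PRECONDITION & SPEC =====
def Spec_f (x : String) (out : List String) : Prop := out = f_alt x
instance (x : String) (out : List String) : Decidable (Spec_f x out) := by unfold Spec_f; infer_instance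

-- ===== CLAIM (what is proved, stated in full; the proofs are below) =====
def Claim_equal_f : Prop := ∀ (x : String), Dom_f x → Spec_f x (f x)

-- ===== LEMMAS AND PROOFS =====

-- the dotted suffixes of l: '.' ++ '.'.join(s) for every nonempty suffix s of l, in order
def dotted : List String → List String
  | [] => []
  | q :: t => ("." ++ PySem.Str.join "." (q :: t)) :: dotted t

theorem join_singleton_str (p : String) : PySem.Str.join "." [p] = p := by
  apply String.toList_inj.mp
  simp [PySem.Str.toList_join, PySem.Chars.join_singleton]

theorem join_cons_cons_str (p q : String) (t : List String) :
    PySem.Str.join "." (p :: q :: t) = p ++ "." ++ PySem.Str.join "." (q :: t) := by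
  apply String.toList_inj.mp
  simp [PySem.Str.toList_join, PySem.Chars.join_cons_cons]

theorem fLoop_latched (l : List String) (q : PySem.Set String) :
    fLoop l q "." 1 = (dotted l).foldl PySem.Set.add q := by
  induction l generalizing q with
  | nil => rfl
  | cons p t ih => simp [fLoop, dotted, ih]

theorem sfx_eq (p : String) (t : List String) :
    sfx p t = (PySem.Str.join "." (p :: t), dotted t) := by
  induction t generalizing p with
  | nil => simp [sfx, dotted, join_singleton_str]
  | cons q t' ih => simp [sfx, dotted, ih, join_cons_cons_str]

-- ===== VERDICT (by name: the statement is the Claim_ definition above) =====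
theorem fLoop_eq_sfx (p : String) (t : List String) :
    fLoop (p :: t) PySem.Set.empty "" 0 =
      (let (acc, res) := sfx p t; PySem.Set.ofList (acc :: res)) := by
  simp only [sfx_eq, fLoop, fLoop_latched, PySem.Set.ofList_eq_foldl, List.foldl,
    PySem.Set.empty]
  rfl

theorem f_spec : Claim_equal_f := by
  intro x _
  unfold Spec_f
  show f x = f_alt x
  simp only [f, f_alt]
  generalize (PySem.Str.split? (PySem.Str.slice x (some 2) (some (-3))) "/").getD [] = parts
  cases parts with
  | nil => rfl
  | cons p t => exact fLoop_eq_sfx p t
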